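-- pv_equiv track=rewrite | github.com/Denis-Telyatnikov/TDA | Witness_complex.py | get_values_mv
-- ===== SOURCE A (Python) =====
-- def search_second_minimum(lst):
--     k = len(lst)
--     if lst[0] > lst[1]:
--         mn1 = 1
--         mn2 = 0
--     else:
--         mn1 = 0
--         mn2 = 1
--     for t in range(2, k):
--         if lst[t] < lst[mn1]:
--             mn2 = mn1
--             mn1 = t
--         else:
--             if lst[t] < lst[mn2]:
--                 mn2 = t
--     return (lst[mn2])
--
-- def get_values_mv(number, matrix):
--     k = len(matrix[0])
--     lst_mv = []
--     if number == 0: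
--         lst_mv = [0 for _ in range(k)]
--     elif number == 1:
--         for i in matrix:
--             lst_mv.append(min(i))
--     elif number == 2:
--         for i in matrix:
--             p = search_second_minimum(i)
--             lst_mv.append(p)
--     elif number == 3:
--         for i in matrix:
--             l = i.copy()
--             l.sort()
--             mn1 = l[0]
--             for t in range(1, len(l) - 2):
--                 if mn1 < l[t] < l[t + 1]:
--                     lst_mv.append(l[t + 1])
--                     break
--     return lst_mv
-- ===== SOURCE B (Python) =====
-- def get_values_mv(number, matrix):
--     k = len(matrix[0])
--     if number == 0:
--         return [0] * k
--     if number == 1: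
--         return [min(row) for row in matrix]
--     if number == 2:
--         return [sorted(row)[1] for row in matrix]
--     if number == 3:
--         lst_mv = []
--         for row in matrix:
--             l = sorted(row)
--             hit = next((l[t + 1] for t in range(1, len(l) - 2)
--                         if l[0] < l[t] < l[t + 1]), None)
--             if hit is not None:
--                 lst_mv.append(hit)
--         return lst_mv
--     return []
-- ===== Notes on version B (the rewrite author's own statement) =====
-- stated objective: idiomatic
-- what changed: The number==2 branch replaces the hand-written two-pass index-tracking second-minimum scan (search_second_minimum) by sorted(row)[1], and the 0/1/2 branches become comprehensions/list-repeat instead of explicit append loops; branch 3 keeps its exact sort-and-scan semantics but expresses the first-hit search with next() over a generator.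
import Mathlib
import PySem

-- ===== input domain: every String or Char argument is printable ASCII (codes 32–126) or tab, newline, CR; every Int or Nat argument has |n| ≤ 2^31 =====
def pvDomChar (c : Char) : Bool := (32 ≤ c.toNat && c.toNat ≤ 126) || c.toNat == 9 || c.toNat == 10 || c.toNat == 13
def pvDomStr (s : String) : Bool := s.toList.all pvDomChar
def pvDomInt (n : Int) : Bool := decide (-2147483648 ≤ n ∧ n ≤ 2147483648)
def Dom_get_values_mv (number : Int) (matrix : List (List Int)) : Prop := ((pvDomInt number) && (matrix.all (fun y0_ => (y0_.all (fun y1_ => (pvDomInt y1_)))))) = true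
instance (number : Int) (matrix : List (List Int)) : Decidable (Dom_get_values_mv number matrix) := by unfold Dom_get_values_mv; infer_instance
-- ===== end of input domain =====

-- B drops the hand-written two-pass second-minimum scan in favour of sorted(row)[1] and
-- renders the remaining branches as comprehensions (objective: idiomatic; no speed claim).

-- ===== PORT A =====
-- shared thin wrappers over PySem primitives (lst[i] and min(lst); defaults unreachable under Pre_)
def pvGet (lst : List Int) (i : Int) : Int := PySem.List.pyGetD lst i 0

def pvMin (lst : List Int) : Int := (PySem.List.min? lst (fun x => x)).getD 0

def search_second_minimum (lst : List Int) : Int :=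
  let k : Int := (lst.length : Int)
  let s0 : Int × Int := if pvGet lst 0 > pvGet lst 1 then (1, 0) else (0, 1)
  let s := (PySem.List.pyRange 2 k 1).foldl
      (fun (s : Int × Int) t =>
        if pvGet lst t < pvGet lst s.1 then (t, s.1)
        else if pvGet lst t < pvGet lst s.2 then (s.1, t)
        else s) s0
  pvGet lst s.2

-- the inner 'for t in range(1, len(l)-2): if mn1 < l[t] < l[t+1]: append; break' loop of branch 3
def scan3A (l : List Int) (mn1 : Int) : List Int → List Int
  | [] => []
  | t :: ts =>
      if mn1 < pvGet l t ∧ pvGet l t < pvGet l (t + 1) then [pvGet l (t + 1)]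
      else scan3A l mn1 ts

def get_values_mv (number : Int) (matrix : List (List Int)) : List Int :=
  let k := ((PySem.List.pyGet? matrix 0).getD []).length
  if number = 0 then (PySem.List.pyRange 0 (k : Int) 1).map (fun _ => 0)
  else if number = 1 then matrix.foldl (fun acc i => acc ++ [pvMin i]) []
  else if number = 2 then matrix.foldl (fun acc i => acc ++ [search_second_minimum i]) []
  else if number = 3 then
    matrix.foldl (fun acc i =>
      let l := PySem.List.sorted i (fun x => x) false
      let mn1 := pvGet l 0
      acc ++ scan3A l mn1 (PySem.List.pyRange 1 ((l.length : Int) - 2) 1)) []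
  else []

-- ===== PORT B =====
def get_values_mv_alt (number : Int) (matrix : List (List Int)) : List Int :=
  let k := ((PySem.List.pyGet? matrix 0).getD []).length
  if number = 0 then PySem.List.pyRepeat [0] (k : Int)
  else if number = 1 then matrix.map (fun row => pvMin row)
  else if number = 2 then
    matrix.map (fun row => pvGet (PySem.List.sorted row (fun x => x) false) 1)
  else if number = 3 then
    matrix.foldl (fun acc row =>
      let l := PySem.List.sorted row (fun x => x) false
      match (PySem.List.pyRange 1 ((l.length : Int) - 2) 1).findSome?
          (fun t => if pvGet l 0 < pvGet l t ∧ pvGet l t < pvGet l (t + 1)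
                    then some (pvGet l (t + 1)) else none) with
      | some v => acc ++ [v]
      | none => acc) []
  else []

-- ===== PRECONDITION & SPEC =====
-- Pre_ excludes exactly the inputs where Python A raises: an empty matrix (matrix[0]),
-- an empty row under number 1 or 3 (min([]) / l[0]), a row of length < 2 under number 2 (lst[1]).
def Pre_get_values_mv (number : Int) (matrix : List (List Int)) : Prop :=
  matrix ≠ [] ∧ (number = 1 → ∀ r ∈ matrix, r ≠ []) ∧
  (number = 2 → ∀ r ∈ matrix, 2 ≤ r.length) ∧ (number = 3 → ∀ r ∈ matrix, r ≠ [])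
instance (number : Int) (matrix : List (List Int)) : Decidable (Pre_get_values_mv number matrix) := by
  unfold Pre_get_values_mv; infer_instance

def pvWitness_get_values_mv : Int × List (List Int) := (2, [[3, 1, 2], [5, 5, 4]])

def Spec_get_values_mv (number : Int) (matrix : List (List Int)) (out : List Int) : Prop := out = get_values_mv_alt number matrix
instance (number : Int) (matrix : List (List Int)) (out : List Int) : Decidable (Spec_get_values_mv number matrix out) := by unfold Spec_get_values_mv; infer_instance

-- ===== CLAIM (what is proved, stated in full; the proofs are below) =====
def Claim_equal_get_values_mv : Prop := ∀ (number : Int) (matrix : List (List Int)), Dom_get_values_mv number matrix → Pre_get_values_mv number matrix → Spec_get_values_mv number matrix (get_values_mv number matrix)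

-- ===== LEMMAS AND PROOFS =====

-- value-level form of A's index-tracking scan (state = the two tracked values)
def vscan : Int → Int → List Int → Int
  | _, b, [] => b
  | a, b, x :: xs => if x < a then vscan x a xs else if x < b then vscan a x xs else vscan a b xs

-- second-smallest value (with multiplicity): min of the list with one copy of its min removed
def sm2 (l : List Int) : Int := pvMin (l.erase (pvMin l))

theorem pvMin_le (l : List Int) (y : Int) (hy : y ∈ l) : pvMin l ≤ y := by
  cases hmin : PySem.List.min? l (fun x => x) with
  | none =>
      exact absurd ((PySem.List.min?_eq_none_iff l _).mp hmin) (by rintro rfl; simp at hy)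
  | some m => simpa [pvMin, hmin] using PySem.List.min?_isMin hmin y hy

theorem pvMin_mem (l : List Int) (h : l ≠ []) : pvMin l ∈ l := by
  cases hmin : PySem.List.min? l (fun x => x) with
  | none => exact absurd ((PySem.List.min?_eq_none_iff l _).mp hmin) h
  | some m => simpa [pvMin, hmin] using PySem.List.min?_mem hmin

theorem pvMin_eq (l : List Int) (m : Int) (hm : m ∈ l) (hlb : ∀ y ∈ l, m ≤ y) : pvMin l = m :=
  le_antisymm (pvMin_le l m hm) (hlb _ (pvMin_mem l (List.ne_nil_of_mem hm)))

theorem pvMin_cons_of_le (c : Int) (l : List Int) (h : ∃ y ∈ l, y ≤ c) :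
    pvMin (c :: l) = pvMin l := by
  obtain ⟨y, hy, hyc⟩ := h
  refine pvMin_eq _ _ (List.mem_cons_of_mem c (pvMin_mem l (List.ne_nil_of_mem hy))) ?_
  intro z hz
  rcases List.mem_cons.mp hz with rfl | hz
  · exact le_trans (pvMin_le l y hy) hyc
  · exact pvMin_le l z hz

theorem pvMin_perm (l1 l2 : List Int) (h : l1.Perm l2) : pvMin l1 = pvMin l2 := by
  rcases l1 with _ | ⟨x, t⟩
  · rw [List.nil_perm.mp h]
  · exact pvMin_eq l2 (pvMin (x :: t)) (h.mem_iff.mp (pvMin_mem _ (List.cons_ne_nil x t)))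
      (fun y hy => pvMin_le _ y (h.mem_iff.mpr hy)) |>.symm

theorem sm2_perm (l1 l2 : List Int) (h : l1.Perm l2) : sm2 l1 = sm2 l2 := by
  have hm := pvMin_perm l1 l2 h
  unfold sm2
  rw [hm]
  exact pvMin_perm _ _ (h.erase (pvMin l2))

theorem sm2_cons_drop (c u v : Int) (l : List Int) (hu : u ∈ l) (hv : v ∈ l.erase u)
    (hu' : u ≤ c) (hv' : v ≤ c) : sm2 (c :: l) = sm2 l := by
  have hvl : v ∈ l := List.mem_of_mem_erase hv
  have hminc : pvMin (c :: l) = pvMin l := pvMin_cons_of_le c l ⟨u, hu, hu'⟩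
  set m := pvMin l with hm
  by_cases hcm : c = m
  · have hum : u = m := le_antisymm (hu'.trans (le_of_eq hcm)) (pvMin_le l u hu)
    have hvm : v = m := le_antisymm (hv'.trans (le_of_eq hcm)) (pvMin_le l v hvl)
    have h1 : (c :: l).erase m = l := by rw [← hcm, List.erase_cons_head]
    have hmem : m ∈ l.erase m := by rw [hum] at hv; rwa [hvm] at hv
    have h2 : pvMin (l.erase m) = m :=
      pvMin_eq _ m hmem (fun y hy => pvMin_le l y (List.mem_of_mem_erase hy))
    show pvMin ((c :: l).erase (pvMin (c :: l))) = pvMin (l.erase (pvMin l))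
    rw [hminc, ← hm, h1, h2]
  · have h1 : (c :: l).erase m = c :: l.erase m := List.erase_cons_tail (by simpa using hcm)
    have hne2 : ∃ y ∈ l.erase m, y ≤ c := by
      by_cases huM : u = m
      · exact ⟨v, by rw [← huM]; exact hv, hv'⟩
      · exact ⟨u, (List.mem_erase_of_ne huM).mpr hu, hu'⟩
    calc sm2 (c :: l) = pvMin ((c :: l).erase m) := by rw [sm2, hminc]
      _ = pvMin (c :: l.erase m) := by rw [h1]
      _ = pvMin (l.erase m) := pvMin_cons_of_le _ _ hne2
      _ = sm2 l := rfl

theorem vscan_eq_sm2 (xs : List Int) : ∀ a b : Int, a ≤ b → vscan a b xs = sm2 (a :: b :: xs) := by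
  induction xs with
  | nil =>
      intro a b hab
      have h1 : pvMin [a, b] = a := pvMin_eq _ a (by simp) (by
        intro y hy
        rcases List.mem_cons.mp hy with rfl | h2
        · exact le_rfl
        · rw [List.mem_singleton.mp h2]; exact hab)
      simp only [vscan, sm2, h1, List.erase_cons_head]
      exact (pvMin_eq [b] b (by simp) (by simp)).symm
  | cons x xs ih =>
      intro a b hab
      show (if x < a then vscan x a xs else if x < b then vscan a x xs else vscan a b xs) = _
      split_ifs with h1 h2
      · rw [ih x a (le_of_lt h1)]
        have hperm : (a :: b :: x :: xs).Perm (b :: x :: a :: xs) :=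
          (List.Perm.swap b a _).trans ((List.Perm.swap x a xs).cons b)
        rw [sm2_perm _ _ hperm]
        exact (sm2_cons_drop b x a (x :: a :: xs) (by simp) (by rw [List.erase_cons_head]; simp)
          (le_trans (le_of_lt h1) hab) hab).symm
      · rw [ih a x (not_lt.mp h1)]
        have hperm : (a :: b :: x :: xs).Perm (b :: a :: x :: xs) := List.Perm.swap b a _
        rw [sm2_perm _ _ hperm]
        exact (sm2_cons_drop b a x (a :: x :: xs) (by simp) (by rw [List.erase_cons_head]; simp)
          hab (le_of_lt h2)).symm
      · rw [ih a b hab]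
        have hperm : (a :: b :: x :: xs).Perm (x :: a :: b :: xs) :=
          ((List.Perm.swap x b xs).cons a).trans (List.Perm.swap x a _)
        rw [sm2_perm _ _ hperm]
        exact (sm2_cons_drop x a b (a :: b :: xs) (by simp) (by rw [List.erase_cons_head]; simp)
          (le_trans hab (not_lt.mp h2)) (not_lt.mp h2)).symm

theorem pvGet_zero (x : Int) (xs : List Int) : pvGet (x :: xs) 0 = x := by
  simp [pvGet, PySem.List.pyGetD_zero_cons]

theorem pvGet_natCast (lst : List Int) (j : Nat) (h : j < lst.length) :
    pvGet lst (j : Int) = lst[j] := by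
  rw [pvGet, PySem.List.pyGetD_natCast]
  exact List.getD_eq_getElem lst 0 h

theorem pvGet_one (x y : Int) (xs : List Int) : pvGet (x :: y :: xs) 1 = y := by
  have := pvGet_natCast (x :: y :: xs) 1 (by simp)
  simpa using this

theorem bridge (lst : List Int) (n : Nat) : ∀ (j : Nat), j + n = lst.length →
    ∀ (i1 i2 : Int), 0 ≤ i1 → i1 < (j : Int) → 0 ≤ i2 → i2 < (j : Int) →
    pvGet lst ((List.foldl (fun (s : Int × Int) t =>
        if pvGet lst t < pvGet lst s.1 then (t, s.1)
        else if pvGet lst t < pvGet lst s.2 then (s.1, t) else s)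
        (i1, i2) (PySem.List.pyRange (j : Int) (lst.length : Int) 1))).2
     = vscan (pvGet lst i1) (pvGet lst i2) (lst.drop j) := by
  induction n with
  | zero =>
      intro j hj i1 i2 _ _ _ _
      have hj' : j = lst.length := by omega
      subst hj'
      rw [PySem.List.pyRange_one_eq_nil (le_refl _), List.drop_length]
      rfl
  | succ n ih =>
      intro j hj i1 i2 h10 h11 h20 h21
      have hjlt : j < lst.length := by omega
      have hcast : (j : Int) < (lst.length : Int) := by exact_mod_cast hjlt
      rw [PySem.List.pyRange_one_cons hcast, List.foldl_cons]
      have hx : pvGet lst (j : Int) = lst[j] := pvGet_natCast lst j hjlt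
      have hdrop : lst.drop j = lst[j] :: lst.drop (j + 1) := List.drop_eq_getElem_cons hjlt
      rw [hdrop]
      show _ = (if lst[j] < pvGet lst i1 then vscan lst[j] (pvGet lst i1) (lst.drop (j+1))
        else if lst[j] < pvGet lst i2 then vscan (pvGet lst i1) lst[j] (lst.drop (j+1))
        else vscan (pvGet lst i1) (pvGet lst i2) (lst.drop (j+1)))
      have hstep : ((j : Int) + 1) = ((j + 1 : Nat) : Int) := by push_cast; ring
      by_cases c1 : lst[j] < pvGet lst i1
      · rw [if_pos (by rw [hx]; exact c1), if_pos c1]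
        rw [hstep]
        rw [ih (j + 1) (by omega) (j : Int) i1 (by positivity) (by omega) h10 (by omega)]
        rw [hx]
      · rw [if_neg (by rw [hx]; exact c1), if_neg c1]
        by_cases c2 : lst[j] < pvGet lst i2
        · rw [if_pos (by rw [hx]; exact c2), if_pos c2]
          rw [hstep]
          rw [ih (j + 1) (by omega) i1 (j : Int) h10 (by omega) (by positivity) (by omega)]
          rw [hx]
        · rw [if_neg (by rw [hx]; exact c2), if_neg c2]
          rw [hstep]
          exact ih (j + 1) (by omega) i1 i2 h10 (by omega) h20 (by omega)

theorem ssm_eq_sm2 (lst : List Int) (h : 2 ≤ lst.length) : search_second_minimum lst = sm2 lst := by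
  match lst, h with
  | x0 :: x1 :: rest, _ =>
    unfold search_second_minimum
    simp only [pvGet_zero, pvGet_one]
    have h2 : ((2 : Nat) : Int) = 2 := by norm_num
    split_ifs with hgt
    · rw [← h2, bridge (x0 :: x1 :: rest) rest.length 2 (by simp; omega) 1 0 (by norm_num) (by norm_num)
        (by norm_num) (by norm_num)]
      simp only [pvGet_zero, pvGet_one, List.drop_succ_cons, List.drop_zero]
      rw [vscan_eq_sm2 rest x1 x0 (le_of_lt hgt)]
      exact sm2_perm _ _ (List.Perm.swap x0 x1 rest)
    · rw [← h2, bridge (x0 :: x1 :: rest) rest.length 2 (by simp; omega) 0 1 (by norm_num) (by norm_num)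
        (by norm_num) (by norm_num)]
      simp only [pvGet_zero, pvGet_one, List.drop_succ_cons, List.drop_zero]
      exact vscan_eq_sm2 rest x0 x1 (not_lt.mp hgt)

theorem sorted_one_eq_sm2 (l : List Int) (h : 2 ≤ l.length) :
    pvGet (PySem.List.sorted l (fun x => x) false) 1 = sm2 l := by
  rcases hs : PySem.List.sorted l (fun x => x) false with _ | ⟨m1, rest⟩
  · have hl := PySem.List.length_sorted l (fun x => x) false
    rw [hs] at hl; simp at hl; omega
  rcases rest with _ | ⟨m2, t⟩
  · have hl := PySem.List.length_sorted l (fun x => x) false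
    rw [hs] at hl; simp at hl; omega
  have hperm : (m1 :: m2 :: t).Perm l := hs ▸ PySem.List.sorted_perm l (fun x => x) false
  have hlb : ∀ y ∈ l, m1 ≤ y := PySem.List.key_head_sorted_le l (fun x => x) hs
  have hm1 : pvMin l = m1 := pvMin_eq l m1 (hperm.mem_iff.mp (by simp)) hlb
  have hpair : (m1 :: m2 :: t).Pairwise (fun a b => a ≤ b) := by
    have hp := PySem.List.sorted_pairwise l (fun x => x)
    rw [hs] at hp; exact hp
  have hperm2 : (m2 :: t).Perm (l.erase m1) := by
    have hp := hperm.erase m1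
    rwa [List.erase_cons_head] at hp
  have hm2 : pvMin (l.erase m1) = m2 := by
    refine pvMin_eq _ _ (hperm2.mem_iff.mp (by simp)) ?_
    intro y hy
    have hy' : y ∈ m2 :: t := hperm2.mem_iff.mpr hy
    rcases List.mem_cons.mp hy' with rfl | hyt
    · exact le_rfl
    · exact (List.pairwise_cons.mp (List.pairwise_cons.mp hpair).2).1 y hyt
  rw [pvGet_one, sm2, hm1, hm2]

theorem scan3A_eq_findSome (l : List Int) (ts : List Int) :
    scan3A l (pvGet l 0) ts =
      match ts.findSome? (fun t => if pvGet l 0 < pvGet l t ∧ pvGet l t < pvGet l (t + 1)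
                    then some (pvGet l (t + 1)) else none) with
      | some v => [v]
      | none => [] := by
  induction ts with
  | nil => rfl
  | cons t ts ih =>
      rw [scan3A, List.findSome?_cons]
      by_cases hc : pvGet l 0 < pvGet l t ∧ pvGet l t < pvGet l (t + 1)
      · rw [if_pos hc, if_pos hc]
      · rw [if_neg hc, if_neg hc]
        exact ih

-- ===== VERDICT (by name: the statement is the Claim_ definition above) =====
theorem get_values_mv_spec : Claim_equal_get_values_mv := by
  intro number matrix _ hpre
  obtain ⟨_, hpre1, hpre2, hpre3⟩ := hpre
  unfold Spec_get_values_mv get_values_mv get_values_mv_alt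
  dsimp only
  by_cases h0 : number = 0
  · rw [if_pos h0, if_pos h0]
    simp only [PySem.List.pyRepeat_singleton, PySem.List.pyRange_zero_natCast, List.map_map,
      Int.toNat_natCast]
    rw [show ((fun (_ : Int) => (0 : Int)) ∘ fun (k : Nat) => ((k : Int))) = fun _ => (0 : Int)
      from rfl]
    rw [List.map_const', List.length_range]
  rw [if_neg h0, if_neg h0]
  by_cases h1 : number = 1
  · rw [if_pos h1, if_pos h1, PySem.List.foldl_append_singleton_eq_map]
    simp
  rw [if_neg h1, if_neg h1]
  by_cases h2 : number = 2
  · rw [if_pos h2, if_pos h2, PySem.List.foldl_append_singleton_eq_map, List.nil_append]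
    refine List.map_congr_left ?_
    intro row hrow
    rw [ssm_eq_sm2 row (hpre2 h2 row hrow), sorted_one_eq_sm2 row (hpre2 h2 row hrow)]
  rw [if_neg h2, if_neg h2]
  by_cases h3 : number = 3
  · rw [if_pos h3, if_pos h3]
    apply PySem.List.foldl_congr_mem
    intro acc row _
    dsimp only
    rw [scan3A_eq_findSome]
    cases (PySem.List.pyRange 1 ((PySem.List.sorted row (fun x => x) false).length - 2) 1).findSome?
        (fun t => if pvGet (PySem.List.sorted row (fun x => x) false) 0
              < pvGet (PySem.List.sorted row (fun x => x) false) t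
            ∧ pvGet (PySem.List.sorted row (fun x => x) false) t
              < pvGet (PySem.List.sorted row (fun x => x) false) (t + 1)
          then some (pvGet (PySem.List.sorted row (fun x => x) false) (t + 1)) else none) with
    | some v => rfl
    | none => exact List.append_nil acc
  rw [if_neg h3, if_neg h3]
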